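-- pv_equiv track=rewrite | github.com/qianxiao996/CTF-Tools | CTF-Tools.py | action_peigen_encrypt
-- ===== SOURCE A (Python) =====
-- def action_peigen_encrypt(text):
--     CODE_TABLE = {  # 培根字典
--         'aaaaa': 'a', 'aaaab': 'b', 'aaaba': 'c', 'aaabb': 'd', 'aabaa': 'e', 'aabab': 'f', 'aabba': 'g',
--         'aabbb': 'h', 'abaaa': 'i', 'abaab': 'j', 'ababa': 'k', 'ababb': 'l', 'abbaa': 'm', 'abbab': 'n',
--         'abbba': 'o', 'abbbb': 'p', 'baaaa': 'q', 'baaab': 'r', 'baaba': 's', 'baabb': 't', 'babaa': 'u',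
--         'babab': 'v', 'babba': 'w', 'babbb': 'x', 'bbaaa': 'y', 'bbaab': 'z'
--     }
--     str = text.lower()
--     listStr = ''
--     for i in str:
--         if i in CODE_TABLE.values():
--             # 将键、值各化为一个列表，取出i在value的位置后根据下标找到对应的键
--             listStr += list(CODE_TABLE.keys())[list(CODE_TABLE.values()).index(i)]
--     result_text = listStr.upper()  # 大写输出
--     return result_text
-- ===== SOURCE B (Python) =====
-- def action_peigen_encrypt(text):
--     # Bacon code of a letter is just its alphabet index in 5-bit binary (a=0 -> 'AAAAA'),
--     # so compute it arithmetically instead of searching a dictionary.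
--     return ''.join(
--         ''.join('AB'[(ord(c) - 97 >> k) & 1] for k in (4, 3, 2, 1, 0))
--         for c in text.lower() if 'a' <= c <= 'z'
--     )
-- ===== Notes on version B (the rewrite author's own statement) =====
-- stated objective: idiomatic
-- what changed: B drops the 26-entry Bacon dictionary and its per-character values().index search, computing each letter's code arithmetically as the 5-bit binary of its alphabet index in a single comprehension.
import Mathlib
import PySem

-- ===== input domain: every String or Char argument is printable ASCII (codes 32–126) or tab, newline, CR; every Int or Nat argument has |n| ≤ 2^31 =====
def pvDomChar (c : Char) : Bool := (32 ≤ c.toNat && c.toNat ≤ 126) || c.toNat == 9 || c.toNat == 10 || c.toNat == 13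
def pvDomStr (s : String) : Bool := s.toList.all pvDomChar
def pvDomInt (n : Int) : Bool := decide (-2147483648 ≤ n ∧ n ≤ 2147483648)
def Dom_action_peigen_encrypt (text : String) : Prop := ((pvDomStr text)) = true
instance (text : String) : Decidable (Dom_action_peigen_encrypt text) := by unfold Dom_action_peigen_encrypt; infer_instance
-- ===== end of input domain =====

-- B replaces A's dictionary search (values().index per character) by the arithmetic fact that a
-- letter's Bacon code is its alphabet index in 5-bit binary; objective: idiomatic/alternative.

-- ===== PORT A =====
def pvCodeTable : PySem.Dict String String := PySem.Dict.ofList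
  [("aaaaa","a"),("aaaab","b"),("aaaba","c"),("aaabb","d"),("aabaa","e"),("aabab","f"),("aabba","g"),
   ("aabbb","h"),("abaaa","i"),("abaab","j"),("ababa","k"),("ababb","l"),("abbaa","m"),("abbab","n"),
   ("abbba","o"),("abbbb","p"),("baaaa","q"),("baaab","r"),("baaba","s"),("baabb","t"),("babaa","u"),
   ("babab","v"),("babba","w"),("babbb","x"),("bbaaa","y"),("bbaab","z")]

def action_peigen_encrypt (text : String) : String :=
  let str := PySem.Str.lower text
  let listStr := str.toList.foldl (fun acc i =>
    if String.ofList [i] ∈ pvCodeTable.values then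
      -- membership was just checked, so Python's list.index cannot fail: index? is some here
      acc ++ (match PySem.List.index? pvCodeTable.values (String.ofList [i]) with
              | some k => pvCodeTable.keys.getD k ""
              | none => "")
    else acc) ""
  PySem.Str.upper listStr

-- ===== PORT B =====
def action_peigen_encrypt_alt (text : String) : String :=
  String.ofList (((PySem.Str.lower text).toList.filter (fun c => 'a' ≤ c && c ≤ 'z')).flatMap
    (fun c => [4,3,2,1,0].map (fun k => if (c.toNat - 97) >>> k % 2 == 1 then 'B' else 'A')))

-- ===== PRECONDITION & SPEC =====
def Spec_action_peigen_encrypt (text : String) (out : String) : Prop := out = action_peigen_encrypt_alt text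
instance (text : String) (out : String) : Decidable (Spec_action_peigen_encrypt text out) := by unfold Spec_action_peigen_encrypt; infer_instance

-- ===== CLAIM (what is proved, stated in full; the proofs are below) =====
def Claim_equal_action_peigen_encrypt : Prop := ∀ (text : String), Dom_action_peigen_encrypt text → Spec_action_peigen_encrypt text (action_peigen_encrypt text)

-- ===== LEMMAS AND PROOFS =====

/-- the 26 lowercase letters, in order -/
def pvLetters : List Char :=
  ['a','b','c','d','e','f','g','h','i','j','k','l','m','n','o','p','q','r','s','t','u','v','w','x','y','z']

/-- per-char contribution of A's loop body (before the final `.upper()`) -/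
def pvFA (c : Char) : List Char :=
  if String.ofList [c] ∈ pvCodeTable.values then
    (match PySem.List.index? pvCodeTable.values (String.ofList [c]) with
     | some k => pvCodeTable.keys.getD k ""
     | none => "").toList
  else []

/-- per-char contribution of B -/
def pvFB (c : Char) : List Char :=
  if ('a' ≤ c && c ≤ 'z') then
    [4,3,2,1,0].map (fun k => if (c.toNat - 97) >>> k % 2 == 1 then 'B' else 'A')
  else []

lemma pv_char_eq (c : Char) {n : Nat} (h : c.toNat = n) : c = Char.ofNat n := by
  subst h; exact (Char.ofNat_toNat c).symm

lemma pv_mem_letters (c : Char) (h1 : 97 ≤ c.toNat) (h2 : c.toNat ≤ 122) : c ∈ pvLetters := by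
  interval_cases h : c.toNat <;> rw [pv_char_eq c h] <;> decide

lemma pv_le_iff (c : Char) : ('a' ≤ c && c ≤ 'z') = true ↔ (97 ≤ c.toNat ∧ c.toNat ≤ 122) := by
  rw [Bool.and_eq_true, decide_eq_true_eq, decide_eq_true_eq, Char.le_def, Char.le_def,
      UInt32.le_iff_toNat_le, UInt32.le_iff_toNat_le]
  exact Iff.rfl

lemma pv_vals_mem (c : Char) (h : String.ofList [c] ∈ pvCodeTable.values) : c ∈ pvLetters := by
  have hv : pvCodeTable.values =
      ["a","b","c","d","e","f","g","h","i","j","k","l","m","n","o","p","q","r","s","t","u","v","w","x","y","z"] := by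
    decide
  rw [hv] at h
  simp only [List.mem_cons, List.not_mem_nil, or_false] at h
  rcases h with h|h|h|h|h|h|h|h|h|h|h|h|h|h|h|h|h|h|h|h|h|h|h|h|h|h <;>
    (replace h := congrArg String.toList h; simp only [String.toList_ofList] at h;
     simp at h; subst h; decide)

/-- pointwise agreement of the two per-char contributions, A's followed by upper -/
lemma pv_pointwise (c : Char) : (pvFA c).map PySem.Chars.upperChar = pvFB c := by
  by_cases hb : (97 ≤ c.toNat ∧ c.toNat ≤ 122)
  · have hm := pv_mem_letters c hb.1 hb.2
    fin_cases hm <;> decide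
  · have h1 : pvFA c = [] := by
      unfold pvFA
      rw [if_neg]
      intro h
      have hm := pv_vals_mem c h
      have : 97 ≤ c.toNat ∧ c.toNat ≤ 122 := by fin_cases hm <;> decide
      exact hb this
    have h2 : pvFB c = [] := by
      unfold pvFB
      rw [if_neg]
      intro h
      exact hb ((pv_le_iff c).mp h)
    simp [h1, h2]

lemma pv_foldA (cs : List Char) (acc : String) :
    (cs.foldl (fun acc i =>
      if String.ofList [i] ∈ pvCodeTable.values then
        acc ++ (match PySem.List.index? pvCodeTable.values (String.ofList [i]) with
                | some k => pvCodeTable.keys.getD k ""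
                | none => "")
      else acc) acc).toList = acc.toList ++ cs.flatMap pvFA := by
  induction cs generalizing acc with
  | nil => simp
  | cons c cs ih =>
    simp only [List.foldl_cons, List.flatMap_cons]
    by_cases h : String.ofList [c] ∈ pvCodeTable.values
    · rw [if_pos h, ih]
      simp [pvFA, if_pos h, String.toList_append]
    · rw [if_neg h, ih]
      simp [pvFA, if_neg h]

lemma pv_flatMap_filter_gen {α β : Type} (p : α → Bool) (g : α → List β) (cs : List α) :
    (cs.filter p).flatMap g = cs.flatMap (fun c => if p c then g c else []) := by
  induction cs with
  | nil => rfl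
  | cons c cs ih => by_cases h : p c <;> simp [h, ih]

lemma pv_flatMap_filter (cs : List Char) :
    (cs.filter (fun c => 'a' ≤ c && c ≤ 'z')).flatMap
      (fun c => [4,3,2,1,0].map (fun k => if (c.toNat - 97) >>> k % 2 == 1 then 'B' else 'A'))
      = cs.flatMap pvFB := by
  rw [pv_flatMap_filter_gen]; rfl

-- ===== VERDICT (by name: the statement is the Claim_ definition above) =====
theorem action_peigen_encrypt_spec : Claim_equal_action_peigen_encrypt := by
  intro text _
  unfold Spec_action_peigen_encrypt action_peigen_encrypt action_peigen_encrypt_alt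
  rw [← String.toList_inj]
  rw [PySem.Str.toList_upper, pv_foldA]
  rw [show (PySem.Chars.upper = List.map PySem.Chars.upperChar) from rfl]
  simp only [String.toList_empty, List.nil_append, String.toList_ofList]
  rw [pv_flatMap_filter, List.map_flatMap]
  exact congrFun (congrArg _ (funext pv_pointwise)) _
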